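-- pv_equiv track=rewrite | github.com/Okkar25/Python_Course | Day_1-30/Day19/midterm.py | piggyBank
-- ===== SOURCE A (Python) =====
-- def piggyBank(coins):
--     currency = {"Q": 25, "D": 10, "N": 5, "P": 1}
--
--     total_cents = 0
--
--     for coin in coins:
--         if coin == "Q":
--             total_cents += currency[coin]
--         elif coin == "D":
--             total_cents += currency[coin]
--         elif coin == "N":
--             total_cents += currency[coin]
--         elif coin == "P":
--             total_cents += currency[coin]
--         else:
--             total_cents += 0
--
--     return total_cents
-- ===== SOURCE B (Python) =====
-- def piggyBank(coins):
--     currency = {"Q": 25, "D": 10, "N": 5, "P": 1}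
--     counts = {}
--     for coin in coins:
--         counts[coin] = counts.get(coin, 0) + 1
--     return sum(currency.get(k, 0) * c for k, c in counts.items())
-- ===== Notes on version B (the rewrite author's own statement) =====
-- stated objective: alternative
-- what changed: B builds a frequency table of the coins in one pass and then computes the total as a weighted sum over the distinct coin types (value times count), instead of A's one-addition-per-coin loop with a four-way if/elif chain.
import Mathlib
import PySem

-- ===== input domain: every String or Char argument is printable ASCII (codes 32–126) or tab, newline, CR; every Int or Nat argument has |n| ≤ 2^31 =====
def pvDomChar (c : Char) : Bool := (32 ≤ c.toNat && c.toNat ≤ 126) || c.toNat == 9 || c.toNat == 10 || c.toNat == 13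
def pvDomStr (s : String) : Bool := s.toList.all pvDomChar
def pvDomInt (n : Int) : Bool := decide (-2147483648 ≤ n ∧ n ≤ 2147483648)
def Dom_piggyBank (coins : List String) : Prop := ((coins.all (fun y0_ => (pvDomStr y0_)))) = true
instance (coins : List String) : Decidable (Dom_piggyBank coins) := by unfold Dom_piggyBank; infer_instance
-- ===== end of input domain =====

-- B counts the coins into a frequency table first, then totals value*count over the distinct coin types (alternative decomposition, same cost).


-- ===== PORT A =====
-- currency[coin] is only reached in a branch where coin is that key, so it cannot raise; ported as getD _ 0 (exact there).
def piggyBank (coins : List String) : Int :=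
  let currency : PySem.Dict String Int := PySem.Dict.ofList [("Q", 25), ("D", 10), ("N", 5), ("P", 1)]
  coins.foldl (fun total_cents coin =>
    if coin == "Q" then total_cents + currency.getD coin 0
    else if coin == "D" then total_cents + currency.getD coin 0
    else if coin == "N" then total_cents + currency.getD coin 0
    else if coin == "P" then total_cents + currency.getD coin 0
    else total_cents + 0) 0

-- ===== PORT B =====
def piggyBank_alt (coins : List String) : Int :=
  let currency : PySem.Dict String Int := PySem.Dict.ofList [("Q", 25), ("D", 10), ("N", 5), ("P", 1)]
  let counts : PySem.Dict String Int :=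
    coins.foldl (fun d coin => d.insert coin (d.getD coin 0 + 1)) PySem.Dict.empty
  (counts.items.map (fun p => currency.getD p.1 0 * p.2)).sum

-- ===== PRECONDITION & SPEC =====
def Spec_piggyBank (coins : List String) (out : Int) : Prop := out = piggyBank_alt coins
instance (coins : List String) (out : Int) : Decidable (Spec_piggyBank coins out) := by unfold Spec_piggyBank; infer_instance

-- ===== CLAIM (what is proved, stated in full; the proofs are below) =====
def Claim_equal_piggyBank : Prop := ∀ (coins : List String), Dom_piggyBank coins → Spec_piggyBank coins (piggyBank coins)

-- ===== LEMMAS AND PROOFS =====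

-- the per-coin value both programs are built around (0 for an unknown coin)
def pvW (c : String) : Int := (PySem.Dict.ofList [("Q", (25:Int)), ("D", 10), ("N", 5), ("P", 1)]).getD c 0

lemma pvW_off (c : String) (hQ : c ≠ "Q") (hD : c ≠ "D") (hN : c ≠ "N") (hP : c ≠ "P") :
    pvW c = 0 := by
  have h : PySem.Dict.ofList [("Q", (25:Int)), ("D", 10), ("N", 5), ("P", 1)]
      = (((PySem.Dict.empty.insert "Q" 25).insert "D" 10).insert "N" 5).insert "P" 1 := by decide
  unfold pvW
  rw [h]
  simp [PySem.Dict.getD_insert, hQ, hD, hN, hP]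

-- A's loop body adds pvW coin in every branch (the else adds 0, where pvW is 0)
lemma stepA_eq (t : Int) (c : String) :
    (if c == "Q" then t + (PySem.Dict.ofList [("Q", (25:Int)), ("D", 10), ("N", 5), ("P", 1)]).getD c 0
     else if c == "D" then t + (PySem.Dict.ofList [("Q", (25:Int)), ("D", 10), ("N", 5), ("P", 1)]).getD c 0
     else if c == "N" then t + (PySem.Dict.ofList [("Q", (25:Int)), ("D", 10), ("N", 5), ("P", 1)]).getD c 0
     else if c == "P" then t + (PySem.Dict.ofList [("Q", (25:Int)), ("D", 10), ("N", 5), ("P", 1)]).getD c 0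
     else t + 0) = t + pvW c := by
  by_cases hQ : c = "Q"
  · simp [hQ, pvW]
  · by_cases hD : c = "D"
    · simp [hD, pvW]
    · by_cases hN : c = "N"
      · simp [hN, pvW]
      · by_cases hP : c = "P"
        · simp [hP, pvW]
        · simp [hQ, hD, hN, hP, pvW_off c hQ hD hN hP]

lemma sum_ite_single (f : String → Int) (ks : List String) (a : String)
    (hnd : ks.Nodup) (ha : a ∈ ks) :
    (ks.map (fun k => if k = a then f k else 0)).sum = f a := by
  induction ks with
  | nil => cases ha
  | cons b tl ih =>
    by_cases h : a = b
    · subst h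
      have hz : (tl.map (fun k => if k = a then f k else 0)).sum = 0 := by
        apply List.sum_eq_zero
        intro x hx
        rcases List.mem_map.mp hx with ⟨y, hy, rfl⟩
        have hne : y ≠ a := fun e => (List.nodup_cons.mp hnd).1 (e ▸ hy)
        simp [hne]
      simp [hz]
    · have hmem : a ∈ tl := by
        rcases List.mem_cons.mp ha with h' | h'
        · exact absurd h' h
        · exact h'
      have hb : b ≠ a := fun e => h e.symm
      simp [hb, ih (List.nodup_cons.mp hnd).2 hmem]

lemma weighted_count_sum (f : String → Int) (ks xs : List String)
    (hnd : ks.Nodup) (hsub : ∀ x ∈ xs, x ∈ ks) :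
    (ks.map (fun k => f k * (xs.count k : Int))).sum = (xs.map f).sum := by
  induction xs with
  | nil => simp
  | cons a tl ih =>
    have ha : a ∈ ks := hsub a (List.mem_cons_self ..)
    have hsub' : ∀ x ∈ tl, x ∈ ks := fun x hx => hsub x (List.mem_cons_of_mem _ hx)
    have hsplit : ∀ k, f k * (((a :: tl).count k : Nat) : Int)
        = f k * (tl.count k : Int) + (if k = a then f k else 0) := by
      intro k
      by_cases h : k = a
      · subst h
        simp
        ring
      · simp only [List.count_cons]
        simp [h]
        exact Or.inl fun e => h e.symm
    calc (ks.map (fun k => f k * ((a :: tl).count k : Int))).sum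
        = (ks.map (fun k => f k * (tl.count k : Int) + (if k = a then f k else 0))).sum := by
          simp only [hsplit]
      _ = (ks.map (fun k => f k * (tl.count k : Int))).sum
          + (ks.map (fun k => if k = a then f k else 0)).sum := by
          rw [← List.sum_map_add]
      _ = ((a :: tl).map f).sum := by
          rw [ih hsub', sum_ite_single f ks a hnd ha, List.map_cons, List.sum_cons, add_comm]

-- ===== VERDICT (by name: the statement is the Claim_ definition above) =====
theorem piggyBank_spec : Claim_equal_piggyBank := by
  intro coins _
  show piggyBank coins = piggyBank_alt coins
  have hA : piggyBank coins = (coins.map pvW).sum := by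
    have e : piggyBank coins = coins.foldl (fun total_cents coin =>
        if coin == "Q" then total_cents + (PySem.Dict.ofList [("Q", (25:Int)), ("D", 10), ("N", 5), ("P", 1)]).getD coin 0
        else if coin == "D" then total_cents + (PySem.Dict.ofList [("Q", (25:Int)), ("D", 10), ("N", 5), ("P", 1)]).getD coin 0
        else if coin == "N" then total_cents + (PySem.Dict.ofList [("Q", (25:Int)), ("D", 10), ("N", 5), ("P", 1)]).getD coin 0
        else if coin == "P" then total_cents + (PySem.Dict.ofList [("Q", (25:Int)), ("D", 10), ("N", 5), ("P", 1)]).getD coin 0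
        else total_cents + 0) 0 := rfl
    have hf : (fun (total_cents : Int) (coin : String) =>
        if coin == "Q" then total_cents + (PySem.Dict.ofList [("Q", (25:Int)), ("D", 10), ("N", 5), ("P", 1)]).getD coin 0
        else if coin == "D" then total_cents + (PySem.Dict.ofList [("Q", (25:Int)), ("D", 10), ("N", 5), ("P", 1)]).getD coin 0
        else if coin == "N" then total_cents + (PySem.Dict.ofList [("Q", (25:Int)), ("D", 10), ("N", 5), ("P", 1)]).getD coin 0
        else if coin == "P" then total_cents + (PySem.Dict.ofList [("Q", (25:Int)), ("D", 10), ("N", 5), ("P", 1)]).getD coin 0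
        else total_cents + 0) = fun t c => t + pvW c := by
      funext t c
      exact stepA_eq t c
    rw [e, hf, List.sum_eq_foldl, List.foldl_map]
  have hB : piggyBank_alt coins
      = ((PySem.Set.ofList coins).map (fun k => pvW k * (coins.count k : Int))).sum := by
    have e : piggyBank_alt coins
        = ((coins.foldl (fun d coin => d.insert coin (d.getD coin 0 + 1))
            PySem.Dict.empty).items.map
            (fun p => (PySem.Dict.ofList [("Q", (25:Int)), ("D", 10), ("N", 5), ("P", 1)]).getD p.1 0 * p.2)).sum := rfl
    rw [e, PySem.Dict.foldl_insert_getD_add_one_eq_counter, PySem.Dict.items_counter,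
      List.map_map]
    rfl
  rw [hA, hB]
  exact (weighted_count_sum pvW _ coins (PySem.Set.nodup_ofList coins)
    (fun x hx => (PySem.Set.mem_ofList coins x).mpr hx)).symm
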